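-- pv_equiv track=rewrite | github.com/geeanlooca/ai-youtube-summarizer | yt_handling.py | clean_downloaded_subs
-- ===== SOURCE A (Python) =====
-- from typing import List
--
-- def clean_downloaded_subs(subtitle_lines: List[str]) -> List[str]:
--     """Clean the downloaded subtitles"""
--
--     # first divide the lines into chunks separated by empty lines
--     chunks = []
--     current_chunk = []
--     for line in subtitle_lines:
--         if line == "\n":
--             chunks.append(current_chunk)
--             current_chunk = []
--         else:
--             current_chunk.append(line)
--
--     # throw away the first chunk (metadata)
--     chunks = chunks[1:]
--
--     # throw away the first line of each chunk (timestamp)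
--     chunks = [chunk[1:] for chunk in chunks]
--
--     # join the chunks into a single list
--     lines = []
--     for chunk in chunks:
--         lines.extend(chunk)
--
--     # remove the newlines
--     lines = [line.strip() for line in lines]
--
--     return lines
-- ===== SOURCE B (Python) =====
-- def clean_downloaded_subs(subtitle_lines):
--     """Clean the downloaded subtitles (single pass, emit at each separator)."""
--     if "\n" not in subtitle_lines:
--         return []
--     i = subtitle_lines.index("\n")
--     out = []
--     pending = []
--     for line in subtitle_lines[i + 1:]:
--         if line == "\n":
--             out.extend(s.strip() for s in pending[1:])
--             pending = []
--         else:
--             pending.append(line)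
--     return out
-- ===== Notes on version B (the rewrite author's own statement) =====
-- stated objective: alternative
-- what changed: Replaces A's three-stage pipeline (build all chunks, drop first chunk, drop each chunk's head, flatten, strip) by a single streaming pass that skips the prelude up to the first separator and emits each chunk's stripped body as soon as its closing separator is seen.
import Mathlib
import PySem

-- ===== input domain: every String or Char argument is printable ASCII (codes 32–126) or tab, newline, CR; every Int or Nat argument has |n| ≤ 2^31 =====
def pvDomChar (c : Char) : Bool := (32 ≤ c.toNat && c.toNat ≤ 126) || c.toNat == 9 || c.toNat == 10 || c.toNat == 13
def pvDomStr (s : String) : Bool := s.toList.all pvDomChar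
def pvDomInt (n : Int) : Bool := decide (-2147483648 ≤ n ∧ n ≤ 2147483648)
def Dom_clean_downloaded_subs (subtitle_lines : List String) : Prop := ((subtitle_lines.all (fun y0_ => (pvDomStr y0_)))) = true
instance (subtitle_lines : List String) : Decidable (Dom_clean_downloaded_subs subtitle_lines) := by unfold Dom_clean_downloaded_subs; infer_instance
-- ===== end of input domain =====

-- B is an alternative single-pass decomposition of A (skip prelude, emit each chunk at its closing separator); same return values, same cost.

-- ===== PORT A =====
-- loop body: if line == "\n": chunks.append(current_chunk); current_chunk = [] else current_chunk.append(line)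
def pvALoop (st : List (List String) × List String) (line : String) : List (List String) × List String :=
  if line == "\n" then (st.1 ++ [st.2], []) else (st.1, st.2 ++ [line])

def clean_downloaded_subs (subtitle_lines : List String) : List String :=
  let st := subtitle_lines.foldl pvALoop ([], [])
  let chunks := PySem.List.slice st.1 (some 1) none                          -- chunks[1:]
  let chunks := chunks.map (fun chunk => PySem.List.slice chunk (some 1) none)  -- chunk[1:]
  let lines := chunks.foldl (fun acc chunk => acc ++ chunk) []               -- lines.extend(chunk)
  lines.map PySem.Str.strip                                                  -- line.strip()

-- ===== PORT B =====
-- loop body: if line == "\n": out.extend(s.strip() for s in pending[1:]); pending = [] else pending.append(line)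
def pvBLoop (st : List String × List String) (line : String) : List String × List String :=
  if line == "\n" then (st.1 ++ (PySem.List.slice st.2 (some 1) none).map PySem.Str.strip, [])
  else (st.1, st.2 ++ [line])

def clean_downloaded_subs_alt (subtitle_lines : List String) : List String :=
  match PySem.List.index? subtitle_lines "\n" with   -- '"\n" not in' + .index together
  | none => []
  | some i =>
    ((PySem.List.slice subtitle_lines (some ((i : Int) + 1)) none).foldl pvBLoop ([], [])).1

-- ===== PRECONDITION & SPEC =====
def Spec_clean_downloaded_subs (subtitle_lines : List String) (out : List String) : Prop := out = clean_downloaded_subs_alt subtitle_lines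
instance (subtitle_lines : List String) (out : List String) : Decidable (Spec_clean_downloaded_subs subtitle_lines out) := by unfold Spec_clean_downloaded_subs; infer_instance

-- ===== CLAIM (what is proved, stated in full; the proofs are below) =====
def Claim_equal_clean_downloaded_subs : Prop := ∀ (subtitle_lines : List String), Dom_clean_downloaded_subs subtitle_lines → Spec_clean_downloaded_subs subtitle_lines (clean_downloaded_subs subtitle_lines)

-- ===== LEMMAS AND PROOFS =====

-- what A's postprocessing computes from a final state, in drop/flatten form
def pvFin (cs : List (List String)) : List String :=
  ((cs.drop 1).map (fun c => c.drop 1)).flatten.map PySem.Str.strip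

lemma pvFin_eq (st : List (List String) × List String) :
    (let chunks := PySem.List.slice st.1 (some 1) none
     let chunks := chunks.map (fun chunk => PySem.List.slice chunk (some 1) none)
     let lines := chunks.foldl (fun acc chunk => acc ++ chunk) []
     lines.map PySem.Str.strip) = pvFin st.1 := by
  simp [pvFin, PySem.List.slice_from_one, PySem.List.foldl_append_eq_flatten, List.drop_one]

-- folding lines containing no "\n" only grows the current chunk
lemma pvALoop_no_sep (pre : List String) (h : "\n" ∉ pre) :
    ∀ (cs : List (List String)) (cur : List String),
      pre.foldl pvALoop (cs, cur) = (cs, cur ++ pre) := by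
  induction pre with
  | nil => simp
  | cons l t ih =>
    intro cs cur
    have hl : l ≠ "\n" := fun hl => h (by simp [hl])
    have ht : "\n" ∉ t := fun hm => h (by simp [hm])
    simp [List.foldl_cons, pvALoop, hl, ih ht]

-- core invariant: after the first separator, A's leftover state and B's streaming state agree
lemma pv_inv (rest : List String) :
    ∀ (first cur : List String) (cs : List (List String)),
      pvFin ((rest.foldl pvALoop (first :: cs, cur)).1)
        = (rest.foldl pvBLoop (pvFin (first :: cs), cur)).1 := by
  induction rest with
  | nil => intro first cur cs; simp
  | cons l t ih =>
    intro first cur cs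
    by_cases hl : l = "\n"
    · have h1 : pvALoop (first :: cs, cur) l = (first :: (cs ++ [cur]), []) := by
        simp [pvALoop, hl]
      have h2 : pvBLoop (pvFin (first :: cs), cur) l
          = (pvFin (first :: (cs ++ [cur])), []) := by
        simp [pvBLoop, hl, pvFin, PySem.List.slice_from_one, List.drop_one]
      simp only [List.foldl_cons, h1, h2, ih]
    · simp only [List.foldl_cons, pvALoop, pvBLoop, beq_iff_eq, hl, ite_false]
      exact ih first (cur ++ [l]) cs

-- ===== VERDICT (by name: the statement is the Claim_ definition above) =====
theorem clean_downloaded_subs_spec : Claim_equal_clean_downloaded_subs := by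
  intro ls _
  unfold Spec_clean_downloaded_subs clean_downloaded_subs clean_downloaded_subs_alt
  rw [pvFin_eq]
  rcases h : PySem.List.index? ls "\n" with _ | i
  · -- no separator: A never appends a chunk
    have hnot : "\n" ∉ ls := (PySem.List.index?_eq_none_iff ls "\n").mp h
    rw [pvALoop_no_sep ls hnot [] []]
    simp [pvFin]
  · -- ls = pre ++ "\n" :: suf, pre.length = i, "\n" ∉ pre
    obtain ⟨pre, suf, hls, hlen, hpre⟩ := (PySem.List.index?_eq_some_iff ls "\n" i).mp h
    subst hls
    show _ = (List.foldl pvBLoop ([], [])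
        (PySem.List.slice (pre ++ "\n" :: suf) (some ((i : Int) + 1)) none)).1
    have hslice : PySem.List.slice (pre ++ "\n" :: suf) (some ((i : Int) + 1)) none = suf := by
      have : ((i : Int) + 1) = ((i + 1 : Nat) : Int) := by push_cast; ring
      rw [this, PySem.List.slice_from_natCast]
      rw [← hlen]
      simp
    rw [hslice, List.foldl_append, pvALoop_no_sep pre hpre, List.foldl_cons]
    have h1 : pvALoop ([], [] ++ pre) "\n" = ([[] ++ pre], []) := by simp [pvALoop]
    rw [h1, pv_inv suf ([] ++ pre) [] []]
    simp [pvFin]
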